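-- pv_equiv track=rewrite | github.com/ipsachin/ERP-APP | ui_jobcards_board.py | _extract_start_finish
-- ===== SOURCE A (Python) =====
-- from typing import Any, Dict, List
--
-- def norm_text(value: Any) -> str:
--     return str(value or "").strip()
--
-- def _extract_start_finish(notes: str):
--     start = finish = ""
--     for line in norm_text(notes).splitlines():
--         if line.startswith("[START]"):
--             start = line.replace("[START]", "", 1).strip()
--         elif line.startswith("[FINISH]"):
--             finish = line.replace("[FINISH]", "", 1).strip()
--     return start, finish
-- ===== SOURCE B (Python) =====
-- def norm_text(value):
--     return str(value or "").strip()
--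
-- def _extract_start_finish(notes: str):
--     start = finish = ""
--     have_s = have_f = False
--     for line in reversed(norm_text(notes).splitlines()):
--         if not have_s and line.startswith("[START]"):
--             start = line[len("[START]"):].strip()
--             have_s = True
--         if not have_f and line.startswith("[FINISH]"):
--             finish = line[len("[FINISH]"):].strip()
--             have_f = True
--         if have_s and have_f:
--             break
--     return start, finish
-- ===== Notes on version B (the rewrite author's own statement) =====
-- stated objective: alternative
-- what changed: B scans the normalized lines in reverse with two found-flags and breaks as soon as both tags are captured (first match in reverse = last match forward), instead of A's full forward pass that keeps overwriting.
import Mathlib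
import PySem

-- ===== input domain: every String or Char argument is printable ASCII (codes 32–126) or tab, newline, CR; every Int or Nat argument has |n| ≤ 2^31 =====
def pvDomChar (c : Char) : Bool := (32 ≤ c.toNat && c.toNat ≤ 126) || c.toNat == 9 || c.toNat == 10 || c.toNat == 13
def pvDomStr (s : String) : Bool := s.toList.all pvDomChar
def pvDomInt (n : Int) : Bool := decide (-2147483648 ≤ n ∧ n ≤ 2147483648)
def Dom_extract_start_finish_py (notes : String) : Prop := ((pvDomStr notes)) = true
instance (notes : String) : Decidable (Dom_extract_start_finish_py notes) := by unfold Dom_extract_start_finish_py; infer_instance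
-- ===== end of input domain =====

-- B replaces A's full forward last-wins scan by a reverse scan with found-flags and an early break; not claimed faster.

-- ===== PORT A =====

-- hand port of Python s.replace(old, "", 1): remove the FIRST occurrence of old (exact for nonempty old,
-- the only way A calls it; new string is empty so nothing is inserted)
def pvReplaceFirst : List Char → List Char → List Char
  | [], _ => []
  | c :: rest, old =>
    if old.isPrefixOf (c :: rest) then (c :: rest).drop old.length
    else c :: pvReplaceFirst rest old

def extract_start_finish_py (notes : String) : String × String :=
  -- norm_text(notes) = str(notes or "").strip() = notes.strip() for a str argument (both '' and a
  -- non-empty string strip to the same result)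
  let lines := PySem.Chars.splitlines (PySem.Chars.strip notes.toList)
  let p := lines.foldl (fun (st : List Char × List Char) line =>
    if PySem.Chars.startswith line "[START]".toList then
      (PySem.Chars.strip (pvReplaceFirst line "[START]".toList), st.2)
    else if PySem.Chars.startswith line "[FINISH]".toList then
      (st.1, PySem.Chars.strip (pvReplaceFirst line "[FINISH]".toList))
    else st) ([], [])
  (String.ofList p.1, String.ofList p.2)

-- ===== PORT B =====

-- reverse loop with two found-flags and the early break; line[len("[START]"):] is List.drop 7
def pvGoB : List (List Char) → List Char → List Char → Bool → Bool → List Char × List Char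
  | [], s, f, _, _ => (s, f)
  | line :: rest, s, f, hs, hf =>
    let ps := if !hs && PySem.Chars.startswith line "[START]".toList
      then (PySem.Chars.strip (line.drop 7), true) else (s, hs)
    let pf := if !hf && PySem.Chars.startswith line "[FINISH]".toList
      then (PySem.Chars.strip (line.drop 8), true) else (f, hf)
    if ps.2 && pf.2 then (ps.1, pf.1) else pvGoB rest ps.1 pf.1 ps.2 pf.2

def extract_start_finish_py_alt (notes : String) : String × String :=
  let lines := PySem.Chars.splitlines (PySem.Chars.strip notes.toList)
  let p := pvGoB lines.reverse [] [] false false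
  (String.ofList p.1, String.ofList p.2)

-- ===== PRECONDITION & SPEC =====
def Spec_extract_start_finish_py (notes : String) (out : String × String) : Prop := out = extract_start_finish_py_alt notes
instance (notes : String) (out : String × String) : Decidable (Spec_extract_start_finish_py notes out) := by unfold Spec_extract_start_finish_py; infer_instance

-- ===== CLAIM (what is proved, stated in full; the proofs are below) =====
def Claim_equal_extract_start_finish_py : Prop := ∀ (notes : String), Dom_extract_start_finish_py notes → Spec_extract_start_finish_py notes (extract_start_finish_py notes)

-- ===== LEMMAS AND PROOFS =====

-- last-wins accumulators for A's forward fold, written with B's drop form of the stripped remainder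
def pvLastS : List (List Char) → List Char → List Char
  | [], d => d
  | line :: rest, d =>
    pvLastS rest (if PySem.Chars.startswith line "[START]".toList
      then PySem.Chars.strip (line.drop 7) else d)

def pvLastF : List (List Char) → List Char → List Char
  | [], d => d
  | line :: rest, d =>
    pvLastF rest (if PySem.Chars.startswith line "[FINISH]".toList
      then PySem.Chars.strip (line.drop 8) else d)

-- first-wins accumulators (what B computes on the reversed list)
def pvFirstS : List (List Char) → List Char → List Char
  | [], d => d
  | line :: rest, d =>
    if PySem.Chars.startswith line "[START]".toList
      then PySem.Chars.strip (line.drop 7) else pvFirstS rest d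

def pvFirstF : List (List Char) → List Char → List Char
  | [], d => d
  | line :: rest, d =>
    if PySem.Chars.startswith line "[FINISH]".toList
      then PySem.Chars.strip (line.drop 8) else pvFirstF rest d

theorem pvReplaceFirst_of_prefix (line old : List Char) (h : old.isPrefixOf line = true) (hne : old ≠ []) :
    pvReplaceFirst line old = line.drop old.length := by
  cases line with
  | nil =>
    cases old with
    | nil => simp at hne
    | cons c cs => simp [List.isPrefixOf] at h
  | cons c rest => simp [pvReplaceFirst, h]

theorem pvFoldA_eq (lines : List (List Char)) (s f : List Char) :
    lines.foldl (fun (st : List Char × List Char) line =>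
      if PySem.Chars.startswith line "[START]".toList then
        (PySem.Chars.strip (pvReplaceFirst line "[START]".toList), st.2)
      else if PySem.Chars.startswith line "[FINISH]".toList then
        (st.1, PySem.Chars.strip (pvReplaceFirst line "[FINISH]".toList))
      else st) (s, f) = (pvLastS lines s, pvLastF lines f) := by
  induction lines generalizing s f with
  | nil => rfl
  | cons line rest ih =>
    simp only [List.foldl, pvLastS, pvLastF]
    by_cases hS : PySem.Chars.startswith line "[START]".toList = true
    · have hpre : "[START]".toList.isPrefixOf line = true := by
        rw [List.isPrefixOf_iff_prefix]
        exact (PySem.Chars.startswith_iff _ _).mp hS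
      have hnF : PySem.Chars.startswith line "[FINISH]".toList = false := by
        rcases (PySem.Chars.startswith_iff _ _).mp hS with ⟨t, ht⟩
        subst ht
        cases h' : PySem.Chars.startswith ("[START]".toList ++ t) "[FINISH]".toList with
        | false => rfl
        | true =>
          rcases (PySem.Chars.startswith_iff _ _).mp h' with ⟨u, hu⟩
          have h1 := congrArg (fun l => l[1]?) hu.symm
          simp at h1
      rw [if_pos hS, ih]
      rw [pvReplaceFirst_of_prefix line _ hpre (by decide),
        show ("[START]".toList.length) = 7 from rfl, if_pos hS,
        if_neg (by simp only [hnF]; exact Bool.false_ne_true)]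
    · rw [if_neg hS, if_neg hS]
      by_cases hF : PySem.Chars.startswith line "[FINISH]".toList = true
      · have hpre : "[FINISH]".toList.isPrefixOf line = true := by
          rw [List.isPrefixOf_iff_prefix]
          exact (PySem.Chars.startswith_iff _ _).mp hF
        rw [if_pos hF, ih, if_pos hF, pvReplaceFirst_of_prefix line _ hpre (by decide),
          show ("[FINISH]".toList.length) = 8 from rfl]
      · rw [if_neg hF, ih, if_neg hF]

theorem pvFirstS_append (xs ys : List (List Char)) (d : List Char) :
    pvFirstS (xs ++ ys) d = pvFirstS xs (pvFirstS ys d) := by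
  induction xs with
  | nil => rfl
  | cons line rest ih => simp only [List.cons_append, pvFirstS, ih]

theorem pvFirstF_append (xs ys : List (List Char)) (d : List Char) :
    pvFirstF (xs ++ ys) d = pvFirstF xs (pvFirstF ys d) := by
  induction xs with
  | nil => rfl
  | cons line rest ih => simp only [List.cons_append, pvFirstF, ih]

theorem pvLastS_eq_firstS_reverse (l : List (List Char)) (d : List Char) :
    pvLastS l d = pvFirstS l.reverse d := by
  induction l generalizing d with
  | nil => rfl
  | cons line rest ih =>
    simp only [pvLastS, List.reverse_cons, pvFirstS_append, ih]
    rfl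

theorem pvLastF_eq_firstF_reverse (l : List (List Char)) (d : List Char) :
    pvLastF l d = pvFirstF l.reverse d := by
  induction l generalizing d with
  | nil => rfl
  | cons line rest ih =>
    simp only [pvLastF, List.reverse_cons, pvFirstF_append, ih]
    rfl

theorem pvGoB_eq (l : List (List Char)) (s f : List Char) (hs hf : Bool) :
    pvGoB l s f hs hf =
      ((if hs then s else pvFirstS l s), (if hf then f else pvFirstF l f)) := by
  induction l generalizing s f hs hf with
  | nil => cases hs <;> cases hf <;> rfl
  | cons line rest ih =>
    cases hS : PySem.Chars.startswith line "[START]".toList <;>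
    cases hF : PySem.Chars.startswith line "[FINISH]".toList <;>
    cases hs <;> cases hf <;>
      simp_all [pvGoB, pvFirstS, pvFirstF]

-- ===== VERDICT (by name: the statement is the Claim_ definition above) =====
theorem extract_start_finish_py_spec : Claim_equal_extract_start_finish_py := by
  intro notes _
  unfold Spec_extract_start_finish_py extract_start_finish_py extract_start_finish_py_alt
  simp only [pvFoldA_eq, pvGoB_eq]
  simp [pvLastS_eq_firstS_reverse, pvLastF_eq_firstF_reverse]
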